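-- pv_equiv track=rewrite | github.com/scottslewis/python-sdk | src/mcp/jptr.py | pointerSegments
-- ===== SOURCE A (Python) =====
-- from typing import Optional, Callable, Generator, Union, Iterable, Dict, List, Any
--
-- def pointerSegments(pointer: str) -> Generator[str, None, None]:
--     """Generate segments from a JSON Pointer."""
--     if len(pointer) > 0 and not pointer.startswith("/"):
--         raise ValueError("Invalid JSON Pointer")
--
--     segmentStart = 1
--     segmentEnd = 0
--
--     while segmentEnd < len(pointer):
--         position = pointer.find("/", segmentStart)
--         segmentEnd = len(pointer) if position == -1 else position
--         segment = pointer[segmentStart:segmentEnd]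
--         segmentStart = segmentEnd + 1
--
--         yield unescape(segment)
--
-- def unescape(segment: str) -> str:
--     """Unescape special characters in a JSON Pointer segment."""
--     return str(segment).replace("~1", "/").replace("~0", "~")
-- ===== SOURCE B (Python) =====
-- def pointerSegments(pointer: str):
--     """Generate segments from a JSON Pointer."""
--     if len(pointer) > 0 and not pointer.startswith("/"):
--         raise ValueError("Invalid JSON Pointer")
--     for segment in pointer.split("/")[1:]:
--         yield unescape(segment)
--
-- def unescape(segment: str) -> str:
--     """Unescape special characters in a JSON Pointer segment."""
--     return str(segment).replace("~1", "/").replace("~0", "~")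
-- ===== Notes on version B (the rewrite author's own statement) =====
-- stated objective: simpler
-- what changed: Replaces the manual find/slice scan with segmentStart/segmentEnd index bookkeeping by one pass that splits the pointer on the separator character, drops the first piece, and yields each remaining piece unescaped; still a generator so the ValueError timing is unchanged.
import Mathlib
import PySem

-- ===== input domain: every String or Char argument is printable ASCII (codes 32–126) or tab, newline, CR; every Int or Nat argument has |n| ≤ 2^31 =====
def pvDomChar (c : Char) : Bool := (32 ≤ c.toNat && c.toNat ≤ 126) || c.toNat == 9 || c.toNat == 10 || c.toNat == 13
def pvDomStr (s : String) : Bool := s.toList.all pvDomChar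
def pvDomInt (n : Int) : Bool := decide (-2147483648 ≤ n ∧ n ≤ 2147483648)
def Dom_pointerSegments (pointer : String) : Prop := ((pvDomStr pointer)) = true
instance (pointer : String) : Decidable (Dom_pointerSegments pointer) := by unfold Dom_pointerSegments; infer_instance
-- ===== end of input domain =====

-- B replaces A's manual find/slice scan by splitting on the separator and dropping the first piece; equivalence is about the
-- list of yielded segments (both Pythons are generators; the ValueError inputs are outside Pre_).

-- shared module helper 'unescape'
def pvUnescape (segment : String) : String :=
  PySem.Str.replace (PySem.Str.replace segment "~1" "/") "~0" "~"

-- ===== PORT A =====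
-- the while-loop of A; segmentStart/segmentEnd as in the Python (always ≥ 0, kept as Nat);
-- fuel (length+1) only makes the recursion total — proved sufficient below
def pointerSegmentsLoop (cs : List Char) (segmentStart segmentEnd : Nat) : Nat → List String
  | 0 => []
  | fuel + 1 =>
    if segmentEnd < cs.length then
      let position : Int := PySem.Chars.findFrom cs ['/'] (segmentStart : Int) none
      let segmentEnd' : Nat := if position = -1 then cs.length else position.toNat
      let segment : List Char := PySem.List.slice cs (some (segmentStart : Int)) (some (segmentEnd' : Int))
      pvUnescape (String.ofList segment) :: pointerSegmentsLoop cs (segmentEnd' + 1) segmentEnd' fuel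
    else []

def pointerSegments (pointer : String) : List String :=
  if 0 < pointer.toList.length ∧ PySem.Str.startswith pointer "/" = false then
    []  -- Python raises ValueError here; excluded by Pre_
  else
    pointerSegmentsLoop pointer.toList 1 0 (pointer.toList.length + 1)

-- ===== PORT B =====
def pointerSegments_alt (pointer : String) : List String :=
  if 0 < pointer.toList.length ∧ PySem.Str.startswith pointer "/" = false then
    []  -- Python raises ValueError here; excluded by Pre_
  else
    (PySem.List.slice ((PySem.Str.split? pointer "/").getD []) (some 1) none).map pvUnescape

-- ===== PRECONDITION & SPEC =====
-- Pre_ excludes exactly the inputs on which A raises ValueError: a nonempty pointer not starting with '/'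
def Pre_pointerSegments (pointer : String) : Prop :=
  pointer = "" ∨ PySem.Str.startswith pointer "/" = true
instance (pointer : String) : Decidable (Pre_pointerSegments pointer) := by
  unfold Pre_pointerSegments; infer_instance

def pvWitness_pointerSegments : String := "/a~1b/c~0d/"

def Spec_pointerSegments (pointer : String) (out : List String) : Prop := out = pointerSegments_alt pointer
instance (pointer : String) (out : List String) : Decidable (Spec_pointerSegments pointer out) := by unfold Spec_pointerSegments; infer_instance

-- ===== CLAIM (what is proved, stated in full; the proofs are below) =====
def Claim_equal_pointerSegments : Prop := ∀ (pointer : String), Dom_pointerSegments pointer → Pre_pointerSegments pointer → Spec_pointerSegments pointer (pointerSegments pointer)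

-- ===== LEMMAS AND PROOFS =====

-- reference split on '/' (proof-only)
def pvSpl : List Char → List (List Char)
  | [] => [[]]
  | c :: rest =>
    if c = '/' then [] :: pvSpl rest
    else
      match pvSpl rest with
      | [] => [[c]]
      | s :: ss => (c :: s) :: ss

lemma pvSpl_ne_nil (l : List Char) : pvSpl l ≠ [] := by
  cases l with
  | nil => simp [pvSpl]
  | cons c rest =>
    simp only [pvSpl]
    split_ifs
    · simp
    · cases h : pvSpl rest <;> simp


lemma pvFindGo (l : List Char) : ∀ (k : Nat), PySem.Chars.find.go ['/'] l k =
    if '/' ∈ l then ((k + l.idxOf '/' : Nat) : Int) else -1 := by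
  induction l with
  | nil => intro k; simp [PySem.Chars.find.go]
  | cons c rest ih =>
    intro k
    by_cases hc : c = '/'
    · subst hc
      simp [PySem.Chars.find.go, List.isPrefixOf]
    · have hpre : List.isPrefixOf ['/'] (c :: rest) = false := by
        simp [List.isPrefixOf]
        intro h; exact absurd h.symm hc
      rw [PySem.Chars.find.go, hpre]
      simp only [Bool.false_eq_true, if_false, ih (k+1), List.mem_cons, List.idxOf_cons]
      have hbe : (c == '/') = false := by simp [hc]
      by_cases hm : '/' ∈ rest
      · simp only [hm, if_true, or_true, hbe, cond_false]
        congr 1; omega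
      · simp [hm, Ne.symm hc]

lemma pvFind_singleton (l : List Char) : PySem.Chars.find l ['/'] =
    if '/' ∈ l then ((l.idxOf '/' : Nat) : Int) else -1 := by
  rw [PySem.Chars.find, pvFindGo]; simp


lemma pvSplitGo (l : List Char) : ∀ (fuel : Nat) (cur : List Char) (acc : List (List Char)), l.length < fuel →
    PySem.Chars.splitOn.go ['/'] fuel l cur.reverse acc =
      acc.reverse ++ (match pvSpl l with
        | [] => []
        | s :: ss => (cur ++ s) :: ss) := by
  induction l with
  | nil =>
    intro fuel cur acc hf
    obtain ⟨f, rfl⟩ : ∃ f, fuel = f + 1 := ⟨fuel - 1, by omega⟩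
    simp [PySem.Chars.splitOn.go, pvSpl]
  | cons c rest ih =>
    intro fuel cur acc hf
    obtain ⟨f, rfl⟩ : ∃ f, fuel = f + 1 := ⟨fuel - 1, by omega⟩
    have hr : rest.length < f := by simp at hf; omega
    by_cases hc : c = '/'
    · subst hc
      have h1 : PySem.Chars.splitOn.go ['/'] (f+1) ('/' :: rest) cur.reverse acc
          = PySem.Chars.splitOn.go ['/'] f rest [] (cur.reverse.reverse :: acc) := by
        simp [PySem.Chars.splitOn.go, List.isPrefixOf]
      rw [h1]
      have h2 := ih f [] (cur :: acc) hr
      simp only [List.reverse_nil] at h2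
      simp only [List.reverse_reverse]
      rw [h2]
      rcases hs : pvSpl rest with _ | ⟨a, as⟩
      · exact absurd hs (pvSpl_ne_nil rest)
      · simp [pvSpl, hs]
    · have h1 : PySem.Chars.splitOn.go ['/'] (f+1) (c :: rest) cur.reverse acc
          = PySem.Chars.splitOn.go ['/'] f rest (c :: cur.reverse) acc := by
        simp [PySem.Chars.splitOn.go, List.isPrefixOf, Ne.symm hc]
      rw [h1, show c :: cur.reverse = (cur ++ [c]).reverse by simp]
      rw [ih f (cur ++ [c]) acc hr]
      rcases hs : pvSpl rest with _ | ⟨a, as⟩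
      · exact absurd hs (pvSpl_ne_nil rest)
      · simp [pvSpl, hc, hs]

lemma pvSplitOn_eq (l : List Char) : PySem.Chars.splitOn l ['/'] = pvSpl l := by
  have h := pvSplitGo l (l.length + 1) [] [] (by omega)
  rw [PySem.Chars.splitOn]
  simp only [List.reverse_nil] at h
  rw [h]
  rcases hs : pvSpl l with _ | ⟨a, as⟩
  · exact absurd hs (pvSpl_ne_nil l)
  · simp

lemma pvSpl_pos (d : List Char) (h : '/' ∈ d) :
    pvSpl d = d.take (d.idxOf '/') :: pvSpl (d.drop (d.idxOf '/' + 1)) := by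
  induction d with
  | nil => simp at h
  | cons c rest ih =>
    by_cases hc : c = '/'
    · subst hc
      simp [pvSpl]
    · have hbe : (c == '/') = false := by simp [hc]
      have hm : '/' ∈ rest := by
        rcases List.mem_cons.mp h with h1 | h1
        · exact absurd h1.symm hc
        · exact h1
      simp only [pvSpl, if_neg hc, List.idxOf_cons, hbe, cond_false, ih hm,
        List.take_succ_cons, List.drop_succ_cons]

lemma pvSpl_neg (d : List Char) (h : '/' ∉ d) : pvSpl d = [d] := by
  induction d with
  | nil => rfl
  | cons c rest ih =>
    have hc : ¬ c = '/' := fun e => h (by simp [e])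
    have hm : '/' ∉ rest := fun e => h (List.mem_cons_of_mem _ e)
    simp [pvSpl, hc, ih hm]

lemma pvLoop_done (cs : List Char) (s e fuel : Nat) (h : cs.length ≤ e) :
    pointerSegmentsLoop cs s e fuel = [] := by
  cases fuel <;> simp [pointerSegmentsLoop, Nat.not_lt.mpr h]

lemma pvLoop (cs : List Char) : ∀ (fuel k : Nat), k < cs.length → cs.length - k ≤ fuel →
    pointerSegmentsLoop cs (k+1) k fuel
      = (pvSpl (cs.drop (k+1))).map (fun l => pvUnescape (String.ofList l)) := by
  intro fuel
  induction fuel with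
  | zero => intro k hk hf; omega
  | succ f ih =>
    intro k hk hf
    have hk1 : k + 1 ≤ cs.length := hk
    have hff := PySem.Chars.findFrom_natCast cs ['/'] (k+1) hk1
    rw [pvFind_singleton] at hff
    by_cases hm : '/' ∈ cs.drop (k+1)
    · -- a further '/' exists: one segment, then recurse after it
      set i := (cs.drop (k+1)).idxOf '/' with hi
      have hilt : i < (cs.drop (k+1)).length := List.idxOf_lt_length_of_mem hm
      have hlen : (cs.drop (k+1)).length = cs.length - (k+1) := List.length_drop
      have hpos : PySem.Chars.findFrom cs ['/'] ((k+1 : Nat) : Int) none = ((k+1+i : Nat) : Int) := by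
        rw [hff]; simp [hm]
      rw [pointerSegmentsLoop, if_pos hk]
      simp only [hpos]
      have hne : ((k+1+i : Nat) : Int) ≠ -1 := by omega
      rw [if_neg hne]
      have htn : ((k+1+i : Nat) : Int).toNat = k+1+i := Int.toNat_natCast _
      rw [htn]
      have hslice : PySem.List.slice cs (some ((k+1 : Nat) : Int)) (some ((k+1+i : Nat) : Int))
          = (cs.drop (k+1)).take i := by
        rw [PySem.List.slice_natCast]; congr 1; omega
      rw [hslice]
      have hk' : k+1+i < cs.length := by omega
      have hrec := ih (k+1+i) hk' (by omega)
      rw [hrec]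
      have hdd : cs.drop (k+1+i+1) = (cs.drop (k+1)).drop (i+1) := by
        rw [List.drop_drop]; congr 1
      rw [hdd, pvSpl_pos (cs.drop (k+1)) hm, ← hi]
      simp
    · -- no further '/': the rest is the last segment
      have hpos : PySem.Chars.findFrom cs ['/'] ((k+1 : Nat) : Int) none = -1 := by
        rw [hff]
        simp [hm]
      rw [pointerSegmentsLoop, if_pos hk]
      simp only [hpos, if_true]
      have hslice : PySem.List.slice cs (some ((k+1 : Nat) : Int)) (some ((cs.length : Nat) : Int))
          = cs.drop (k+1) := by
        rw [PySem.List.slice_natCast]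
        exact List.take_of_length_le (by simp)
      rw [hslice, pvLoop_done cs _ _ _ (le_refl _), pvSpl_neg _ hm]
      simp

theorem pointerSegments_spec : Claim_equal_pointerSegments := by
  intro pointer _ hpre
  unfold Spec_pointerSegments pointerSegments pointerSegments_alt
  rcases hpre with h | h
  · subst h; rfl
  · have hsw : ¬(0 < pointer.toList.length ∧ PySem.Str.startswith pointer "/" = false) := by
      intro hab
      rw [h] at hab
      simp at hab
    rw [if_neg hsw, if_neg hsw]
    obtain ⟨rest, hrest⟩ : ∃ rest, pointer.toList = '/' :: rest := by
      have hpre : ['/'] <+: pointer.toList := by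
        have := PySem.Chars.startswith_iff pointer.toList ['/']
        simp only [PySem.Str.startswith] at h
        exact this.mp h
      obtain ⟨t, ht⟩ := hpre
      exact ⟨t, ht.symm⟩
    rw [hrest]
    have hA := pvLoop ('/' :: rest) (('/' :: rest).length + 1) 0 (by simp) (by omega)
    rw [hA]
    have hsplit : PySem.Str.split? pointer "/"
        = some ((PySem.Chars.splitOn pointer.toList ['/']).map String.ofList) := by
      rw [PySem.Str.split?, PySem.Chars.split?]
      simp
    rw [hsplit, hrest]
    rw [pvSplitOn_eq]
    have hspl : pvSpl ('/' :: rest) = [] :: pvSpl rest := by simp [pvSpl]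
    rw [hspl]
    simp [PySem.List.slice_from_one]
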